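-- pv_equiv track=rewrite | github.com/AssembleCat/python-algorithm | 250520/방화벽 설치하기/firewall-installation.py | find_combo
-- ===== SOURCE A (Python) =====
-- def find_combo(position):
--     combo = set()
--
--     def tracking(start, group):
--         if len(group) == 3:
--             combo.add(tuple(group))
--             return
--
--         for i in range(start, len(position)):
--             tracking(i+1, group + [position[i]])
--
--     tracking(0, [])
--     return list(combo)
-- ===== SOURCE B (Python) =====
-- def find_combo(position):
--     combo = set()
--     n = len(position)
--     for i in range(n):
--         for j in range(i + 1, n):
--             for k in range(j + 1, n):
--                 combo.add((position[i], position[j], position[k]))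
--     return list(combo)
-- ===== Notes on version B (the rewrite author's own statement) =====
-- stated objective: simpler
-- what changed: Replaces the recursive backtracking helper (which builds growing group lists and re-scans ranges) with three flat nested index loops i<j<k that add each triple to the same set accumulator.
import Mathlib
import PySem

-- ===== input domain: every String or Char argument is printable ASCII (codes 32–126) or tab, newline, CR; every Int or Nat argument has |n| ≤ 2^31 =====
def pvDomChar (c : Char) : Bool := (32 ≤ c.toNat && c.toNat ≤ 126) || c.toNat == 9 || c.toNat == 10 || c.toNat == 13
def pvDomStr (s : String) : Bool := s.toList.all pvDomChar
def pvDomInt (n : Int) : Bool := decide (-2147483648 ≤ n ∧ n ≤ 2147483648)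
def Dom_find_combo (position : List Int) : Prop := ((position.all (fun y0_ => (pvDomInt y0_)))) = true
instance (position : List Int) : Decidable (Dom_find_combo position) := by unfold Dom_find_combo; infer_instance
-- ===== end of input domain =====

-- B replaces the recursive `tracking` backtracker with three flat nested i<j<k index loops over the same set accumulator (simpler decomposition, same result).


-- ===== PORT A =====
-- recursive helper `tracking`; the `if 3 < group.length` branch is a totality guard only
-- (tracking is only ever called with group.length ≤ 3, mirroring Python's reachable states)
def find_combo_track (position : List Int) (start : Int) (group : List Int)
    (combo : PySem.Set (Int × Int × Int)) : PySem.Set (Int × Int × Int) :=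
  if group.length = 3 then
    match group with
    | [a, b, c] => combo.add (a, b, c)
    | _ => combo
  else if 3 < group.length then combo
  else
    (PySem.List.pyRange start (position.length : Int) 1).foldl
      (fun acc i =>
        find_combo_track position (i + 1) (group ++ [PySem.List.pyGetD position i 0]) acc)
      combo
termination_by 3 - group.length
decreasing_by simp; omega

def find_combo (position : List Int) : List (Int × Int × Int) :=
  find_combo_track position 0 [] PySem.Set.empty

-- ===== PORT B =====
def find_combo_alt (position : List Int) : List (Int × Int × Int) :=
  let n : Int := position.length
  (PySem.List.pyRange 0 n 1).foldl (fun combo i =>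
    (PySem.List.pyRange (i + 1) n 1).foldl (fun combo j =>
      (PySem.List.pyRange (j + 1) n 1).foldl (fun combo k =>
        PySem.Set.add combo (PySem.List.pyGetD position i 0, PySem.List.pyGetD position j 0,
                   PySem.List.pyGetD position k 0)) combo) combo)
    PySem.Set.empty


-- ===== PRECONDITION & SPEC =====
def Spec_find_combo (position : List Int) (out : List (Int × Int × Int)) : Prop := out = find_combo_alt position
instance (position : List Int) (out : List (Int × Int × Int)) : Decidable (Spec_find_combo position out) := by unfold Spec_find_combo; infer_instance

-- ===== CLAIM (what is proved, stated in full; the proofs are below) =====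
def Claim_equal_find_combo : Prop := ∀ (position : List Int), Dom_find_combo position → Spec_find_combo position (find_combo position)

-- ===== LEMMAS AND PROOFS =====

lemma track3 (p : List Int) (s a b c : Int) (acc : PySem.Set (Int × Int × Int)) :
    find_combo_track p s [a, b, c] acc = acc.add (a, b, c) := by
  rw [find_combo_track]; rfl

lemma track2 (p : List Int) (s a b : Int) (acc : PySem.Set (Int × Int × Int)) :
    find_combo_track p s [a, b] acc =
      (PySem.List.pyRange s (p.length : Int) 1).foldl
        (fun acc k => acc.add (a, b, PySem.List.pyGetD p k 0)) acc := by
  rw [find_combo_track]; simp [track3]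
  intro a' b' c' h; simp at h

lemma track1 (p : List Int) (s a : Int) (acc : PySem.Set (Int × Int × Int)) :
    find_combo_track p s [a] acc =
      (PySem.List.pyRange s (p.length : Int) 1).foldl
        (fun acc j =>
          (PySem.List.pyRange (j + 1) (p.length : Int) 1).foldl
            (fun acc k => acc.add (a, PySem.List.pyGetD p j 0, PySem.List.pyGetD p k 0)) acc)
        acc := by
  rw [find_combo_track]; simp [track2]
  intro a' b' c' h; simp at h

lemma track0 (p : List Int) (s : Int) (acc : PySem.Set (Int × Int × Int)) :
    find_combo_track p s [] acc =
      (PySem.List.pyRange s (p.length : Int) 1).foldl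
        (fun acc i =>
          (PySem.List.pyRange (i + 1) (p.length : Int) 1).foldl
            (fun acc j =>
              (PySem.List.pyRange (j + 1) (p.length : Int) 1).foldl
                (fun acc k => acc.add (PySem.List.pyGetD p i 0, PySem.List.pyGetD p j 0,
                    PySem.List.pyGetD p k 0)) acc) acc)
        acc := by
  rw [find_combo_track]; simp [track1]
  intro a' b' c' h; simp at h

-- ===== VERDICT (by name: the statement is the Claim_ definition above) =====
theorem find_combo_spec : Claim_equal_find_combo := by
  intro position _
  unfold Spec_find_combo find_combo find_combo_alt
  rw [track0]
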